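-- pv_equiv track=rewrite | github.com/wmatex/SVP-grounders | Datasets/Syntetic/utils.py | generate_identifier
-- ===== SOURCE A (Python) =====
-- def generate_identifier(x, y = None):
--     a = 97
--     z = 123
--     chars = [str(chr(i)) for i in range(a, z)]
--
--     xx = 1
--     idt = ""
--     while xx > 0:
--         idt = chars[x % (z - a)] + idt
--         xx = int(x / (z - a))
--         x = xx
--
--     if y is not None:
--         return idt + str(y)
--     else:
--         return idt
-- ===== SOURCE B (Python) =====
-- def generate_identifier(x, y=None):
--     chars = "abcdefghijklmnopqrstuvwxyz"
--
--     def convert(v):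
--         q, r = divmod(v, 26)
--         digit = chars[r]
--         return digit if q == 0 else convert(q) + digit
--
--     idt = convert(x)
--     return idt if y is None else idt + str(y)
-- ===== Notes on version B (the rewrite author's own statement) =====
-- stated objective: alternative
-- what changed: Replaces A's accumulate-in-a-while-loop (mutable state, prepending into a string) with a recursive divmod-based base-26 helper; Pre_ restricts to nonnegative x, the natural identifier domain, because on negative x A's float truncation plus Python's floor modulo accidentally yields a single wrapped letter while B's recursion does not terminate (RecursionError).
-- outside the precondition, e.g. on generate_identifier(-1, None): A returns 'z', B raises RecursionError
import Mathlib
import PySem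

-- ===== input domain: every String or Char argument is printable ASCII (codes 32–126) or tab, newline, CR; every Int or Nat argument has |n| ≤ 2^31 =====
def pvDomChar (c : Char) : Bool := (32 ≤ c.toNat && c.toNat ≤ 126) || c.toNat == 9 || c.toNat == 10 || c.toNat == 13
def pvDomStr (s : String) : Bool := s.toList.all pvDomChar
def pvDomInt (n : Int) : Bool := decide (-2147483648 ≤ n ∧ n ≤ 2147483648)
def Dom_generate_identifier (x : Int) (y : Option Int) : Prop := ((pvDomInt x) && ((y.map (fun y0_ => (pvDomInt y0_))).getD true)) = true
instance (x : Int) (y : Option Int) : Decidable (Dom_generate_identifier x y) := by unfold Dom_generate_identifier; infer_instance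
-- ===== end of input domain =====

-- B replaces A's accumulate-in-a-while-loop with a recursive divmod-based base-26 helper (different decomposition; same cost).

-- quotient shape for A's termination argument (cited by name in decreasing_by)
theorem gi_tdiv_sign (x : Int) :
    Int.tdiv x 26 = (if x < 0 then -((x.natAbs / 26 : Nat) : Int) else ((x.natAbs / 26 : Nat) : Int)) := by
  cases x with
  | ofNat m => simp [Int.tdiv]
  | negSucc m => simp [Int.tdiv]

theorem gi_tdiv_lt (x : Int) (h : 0 < Int.tdiv x 26) : (Int.tdiv x 26).natAbs < x.natAbs := by
  rw [gi_tdiv_sign] at *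
  split_ifs at * <;> omega

-- ===== PORT A =====
-- chars = [str(chr(i)) for i in range(a, z)]  with a = 97, z = 123
def gi_chars : List String :=
  (PySem.List.pyRange 97 123 1).map (fun i => String.singleton (Char.ofNat i.toNat))

-- the while loop; int(x / 26) truncates toward zero, which for |x| ≤ 2^31 (the stated domain)
-- is exactly Int.tdiv (float division is exact there); xx = 1 initially so the body always runs once
def gi_loop (x : Int) (idt : String) : String :=
  let idt' := (PySem.List.pyGetD gi_chars (x % 26) "") ++ idt
  let xx := Int.tdiv x 26
  if 0 < xx then gi_loop xx idt' else idt'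
termination_by x.natAbs
decreasing_by exact gi_tdiv_lt _ ‹_›

def generate_identifier (x : Int) (y : Option Int) : String :=
  let idt := gi_loop x ""
  match y with
  | some n => idt ++ PySem.Int.toStr n
  | none => idt

-- ===== PORT B =====
def giAlt_chars : String := "abcdefghijklmnopqrstuvwxyz"

-- recursive helper: q, r = divmod(v, 26); fuel makes the recursion structural — for v ≥ 0
-- (all of Pre_) natAbs + 1 steps always suffice, so the fuel case is never reached there;
-- on negative v the Python recursion does not terminate (RecursionError), which Pre_ excludes.
def giAlt_convert : Nat → Int → String
  | 0, _ => ""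
  | fuel + 1, v =>
    let q := PySem.Int.floordiv v 26
    let r := PySem.Int.mod v 26
    let digit := String.singleton ((PySem.Str.pyGet? giAlt_chars r).getD 'a')
    if q = 0 then digit else giAlt_convert fuel q ++ digit

def generate_identifier_alt (x : Int) (y : Option Int) : String :=
  let idt := giAlt_convert (x.natAbs + 1) x
  match y with
  | some n => idt ++ PySem.Int.toStr n
  | none => idt

-- ===== PRECONDITION & SPEC =====
-- Pre_ excludes negative x, on which A's truncating int(x/26) makes the wraparound digit chars[x % 26]
-- the whole result (an accident of the loop) while B's divmod recursion never reaches 0 and raises RecursionError.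
def Pre_generate_identifier (x : Int) (y : Option Int) : Prop := 0 ≤ x
instance (x : Int) (y : Option Int) : Decidable (Pre_generate_identifier x y) := by unfold Pre_generate_identifier; infer_instance

def pvWitness_generate_identifier : Int × Option Int := (27, some 5)

def Spec_generate_identifier (x : Int) (y : Option Int) (out : String) : Prop := out = generate_identifier_alt x y
instance (x : Int) (y : Option Int) (out : String) : Decidable (Spec_generate_identifier x y out) := by unfold Spec_generate_identifier; infer_instance

-- ===== CLAIM =====
def Claim_equal_generate_identifier : Prop := ∀ (x : Int) (y : Option Int), Dom_generate_identifier x y → Pre_generate_identifier x y → Spec_generate_identifier x y (generate_identifier x y)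

-- ===== LEMMAS AND PROOFS =====

-- both sides pick the same digit for residue r < 26
theorem gi_digit_eq : ∀ r : Fin 26,
    PySem.List.pyGetD gi_chars (r : Int) "" =
      String.singleton ((PySem.Str.pyGet? giAlt_chars (r : Int)).getD 'a') := by
  decide

theorem gi_digit_eq' (x : Int) :
    PySem.List.pyGetD gi_chars (x % 26) "" =
      String.singleton ((PySem.Str.pyGet? giAlt_chars (x % 26)).getD 'a') := by
  have h : (0:Int) ≤ x % 26 ∧ x % 26 < 26 := ⟨Int.emod_nonneg x (by norm_num), Int.emod_lt_of_pos x (by norm_num)⟩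
  have := gi_digit_eq ⟨(x % 26).toNat, by omega⟩
  simpa [Int.toNat_of_nonneg h.1] using this

theorem gi_mod_eq (x : Int) : PySem.Int.mod x 26 = x % 26 :=
  PySem.Int.mod_eq_emod_of_pos (by norm_num)

theorem gi_quot_eq (x : Int) (hx : 0 ≤ x) :
    PySem.Int.floordiv x 26 = Int.tdiv x 26 := by
  rw [PySem.Int.floordiv_eq_ediv_of_pos (by norm_num), gi_tdiv_sign, if_neg (by omega)]
  omega

theorem gi_loop_eq_convert (n : Nat) (x : Int) (hx : 0 ≤ x) (hxn : x.toNat ≤ n)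
    (fuel : Nat) (hf : x.toNat < fuel) (idt : String) :
    gi_loop x idt = giAlt_convert fuel x ++ idt := by
  induction n generalizing x fuel idt with
  | zero =>
    have hx0 : x = 0 := by omega
    subst hx0
    obtain ⟨f, rfl⟩ : ∃ f, fuel = f + 1 := ⟨fuel - 1, by omega⟩
    rw [gi_loop.eq_def, giAlt_convert]
    simp only [gi_quot_eq 0 le_rfl, gi_mod_eq, gi_digit_eq']
    have h0 : Int.tdiv 0 26 = 0 := by decide
    rw [h0, if_neg (by norm_num), if_pos rfl]
  | succ n ih =>
    obtain ⟨f, rfl⟩ : ∃ f, fuel = f + 1 := ⟨fuel - 1, by omega⟩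
    rw [gi_loop.eq_def, giAlt_convert]
    simp only [gi_quot_eq x hx, gi_mod_eq, gi_digit_eq']
    have hq : 0 ≤ Int.tdiv x 26 := by rw [gi_tdiv_sign, if_neg (by omega)]; omega
    by_cases h2 : 0 < Int.tdiv x 26
    · have hlt : (Int.tdiv x 26).natAbs < x.natAbs := gi_tdiv_lt x h2
      rw [if_pos h2, if_neg (by omega),
        ih (Int.tdiv x 26) hq (by omega) f (by omega), String.append_assoc]
    · rw [if_neg h2, if_pos (by omega)]

-- ===== VERDICT =====
theorem generate_identifier_spec : Claim_equal_generate_identifier := by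
  intro x y _ hpre
  unfold Spec_generate_identifier generate_identifier generate_identifier_alt
  rw [gi_loop_eq_convert x.toNat x hpre le_rfl (x.natAbs + 1) (by omega)]
  cases y <;> simp
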